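-- pv_equiv track=rewrite | github.com/bcov77/silent_tools | _helpers_silent/rosetta_util.py | chain_ids_to_silent_format
-- ===== SOURCE A (Python) =====
-- def chain_ids_to_silent_format(chain_ids, res_nums=None):
--     if res_nums is None:
--         res_nums = list(range(1, len(chain_ids)+1))
--     res_nums = res_nums + [None]
--     parts = []
--     cur_letter = None
--     cur_start = None
--     start_no = None
--     for i, letter in enumerate(chain_ids + "\n"): # chain id can never be \n
--         if letter != cur_letter or (start_no + i - cur_start != res_nums[i]):
--             if cur_letter != None:
--                 parts.append("%s:%i-%i"%(cur_letter, start_no, start_no + i - cur_start - 1))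
--             cur_letter = letter
--             cur_start = i
--             start_no = res_nums[i]
--     return " ".join(parts)
-- ===== SOURCE B (Python) =====
-- def chain_ids_to_silent_format(chain_ids, res_nums=None):
--     ns = list(range(1, len(chain_ids) + 1)) if res_nums is None else res_nums
--     n = len(chain_ids)
--     starts = [i for i in range(n)
--               if i == 0 or chain_ids[i] != chain_ids[i - 1] or ns[i] != ns[i - 1] + 1]
--     ends = starts[1:] + [n]
--     return " ".join("%s:%i-%i" % (chain_ids[s], ns[s], ns[e - 1])
--                     for s, e in zip(starts, ends))
-- ===== Notes on version B (the rewrite author's own statement) =====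
-- stated objective: simpler
-- what changed: A runs one sentinel-flush loop over the chain ids plus an appended sentinel character, carrying a current-run state (cur_letter, cur_start, start_no) and formatting at each flush; B has no run accumulator at all: it computes the list of segment-start indices by a pairwise adjacent-element boundary test, pairs each start with the next start (or the length) to get the segment ends, and formats the resulting (start, end) pairs in a separate pass.
-- outside the precondition, e.g. on chain_ids_to_silent_format('\n', [5, 6]): A returns '', B returns '\n:5-5'; on chain_ids_to_silent_format('A', []): A raises TypeError, B raises IndexError
import Mathlib
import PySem

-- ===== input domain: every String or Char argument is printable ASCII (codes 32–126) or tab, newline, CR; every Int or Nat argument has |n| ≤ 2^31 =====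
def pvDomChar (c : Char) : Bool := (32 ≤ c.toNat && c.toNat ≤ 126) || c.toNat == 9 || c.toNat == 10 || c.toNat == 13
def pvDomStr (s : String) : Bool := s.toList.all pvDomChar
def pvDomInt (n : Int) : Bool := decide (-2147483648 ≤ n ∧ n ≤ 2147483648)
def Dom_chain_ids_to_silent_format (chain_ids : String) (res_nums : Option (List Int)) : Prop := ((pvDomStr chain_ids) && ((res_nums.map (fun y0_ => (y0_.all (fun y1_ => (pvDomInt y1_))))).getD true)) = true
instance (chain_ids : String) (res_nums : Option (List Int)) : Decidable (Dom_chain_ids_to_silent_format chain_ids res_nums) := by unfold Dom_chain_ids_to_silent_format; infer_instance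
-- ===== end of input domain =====

-- B drops A's sentinel-flush loop with its carried run state: it computes segment-start
-- indices by a pairwise boundary test, pairs them with the following starts as ends, and
-- formats those (start,end) pairs in a separate pass; equal return values on Pre_.

-- "%s:%i-%i" % (c, s, e) where c is a one-character string
def pvFmt (c : Char) (s e : Int) : List Char :=
  [c] ++ (':' :: PySem.Int.toChars s) ++ ('-' :: PySem.Int.toChars e)

-- ===== PORT A =====
-- the for-loop of A as structural recursion over the remaining characters of chain_ids+"\n",
-- carrying the enumerate counter i and the whole list res_nums+[None] (rns : List (Option Int)).
-- cur_start/start_no are Python's None-initialised variables; the '.getD 0' defaults are only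
-- taken on paths Python never evaluates (short-circuit of 'or' / the 'cur_letter != None' guard).
def pvALoop : List Char → List (Option Int) → Nat → List (List Char) →
    Option Char → Option Int → Option Int → List (List Char)
  | [], _, _, parts, _, _, _ => parts
  | letter :: restCs, rns, i, parts, cur_letter, cur_start, start_no =>
    if some letter ≠ cur_letter ∨
        some (start_no.getD 0 + (i : Int) - cur_start.getD 0) ≠ rns.getD i none then
      pvALoop restCs rns (i+1)
        (match cur_letter with
         | some c => parts ++ [pvFmt c (start_no.getD 0)
             (start_no.getD 0 + (i : Int) - cur_start.getD 0 - 1)]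
         | none => parts)
        (some letter) (some (i : Int)) (rns.getD i none)
    else
      pvALoop restCs rns (i+1) parts cur_letter cur_start start_no

def chain_ids_to_silent_format (chain_ids : String) (res_nums : Option (List Int)) : String :=
  let cs := chain_ids.toList
  let ns := match res_nums with
    | none => PySem.List.pyRange 1 ((cs.length : Int) + 1) 1
    | some l => l
  let rns : List (Option Int) := ns.map some ++ [none]   -- res_nums = res_nums + [None]
  String.ofList (PySem.Chars.join [' '] (pvALoop (cs ++ ['\n']) rns 0 [] none none none))

-- ===== PORT B =====
-- i == 0 or chain_ids[i] != chain_ids[i-1] or ns[i] != ns[i-1] + 1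
-- (.getD indexing is exact here: every index B's Python evaluates is in range on Pre_ inputs)
def pvBoundary (cs : List Char) (ns : List Int) (i : Nat) : Bool :=
  i == 0 || cs.getD i ' ' != cs.getD (i-1) ' ' || ns.getD i 0 != ns.getD (i-1) 0 + 1

def chain_ids_to_silent_format_alt (chain_ids : String) (res_nums : Option (List Int)) : String :=
  let cs := chain_ids.toList
  let ns := match res_nums with
    | none => PySem.List.pyRange 1 ((cs.length : Int) + 1) 1
    | some l => l
  let n := cs.length
  let starts := (List.range n).filter (pvBoundary cs ns)
  let ends := starts.drop 1 ++ [n]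
  String.ofList (PySem.Chars.join [' ']
    ((starts.zip ends).map (fun se => pvFmt (cs.getD se.1 ' ') (ns.getD se.1 0) (ns.getD (se.2 - 1) 0))))

-- ===== PRECONDITION & SPEC =====
-- Pre_ excludes explicit res_nums shorter than chain_ids, on which A raises a TypeError through
-- its None sentinel (B raises an IndexError there), and the inputs where chain_ids ends in a
-- newline character and an extra residue number past the end of chain_ids continues the final
-- run: the newline is A's reserved loop sentinel (its comment states a chain id can never be a
-- newline), and A's suppressed final flush there is a sentinel artefact no caller may rely on,
-- which B does not reproduce.
def Pre_chain_ids_to_silent_format (chain_ids : String) (res_nums : Option (List Int)) : Prop :=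
  (match res_nums with
  | none => true
  | some l => decide (chain_ids.toList.length ≤ l.length ∧
      ¬ (chain_ids.toList.getLast? = some '\n' ∧ chain_ids.toList.length < l.length ∧
         l.getD chain_ids.toList.length 0 = l.getD (chain_ids.toList.length - 1) 0 + 1))) = true
instance (chain_ids : String) (res_nums : Option (List Int)) : Decidable (Pre_chain_ids_to_silent_format chain_ids res_nums) := by unfold Pre_chain_ids_to_silent_format; infer_instance

def pvWitness_chain_ids_to_silent_format : String × Option (List Int) := ("AAB", some [5, 6, 9])

def Spec_chain_ids_to_silent_format (chain_ids : String) (res_nums : Option (List Int)) (out : String) : Prop := out = chain_ids_to_silent_format_alt chain_ids res_nums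
instance (chain_ids : String) (res_nums : Option (List Int)) (out : String) : Decidable (Spec_chain_ids_to_silent_format chain_ids res_nums out) := by unfold Spec_chain_ids_to_silent_format; infer_instance

-- ===== CLAIM (what is proved, stated in full; the proofs are below) =====
def Claim_equal_chain_ids_to_silent_format : Prop := ∀ (chain_ids : String) (res_nums : Option (List Int)), Dom_chain_ids_to_silent_format chain_ids res_nums → Pre_chain_ids_to_silent_format chain_ids res_nums → Spec_chain_ids_to_silent_format chain_ids res_nums (chain_ids_to_silent_format chain_ids res_nums)

-- ===== LEMMAS AND PROOFS =====

-- reference run decomposition; pvGoS carries the sentinel slot A compares against at i = len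
-- (sent = res_nums[len] as an Option): it suppresses the final flush exactly when the run
-- letter is a newline and sent continues the run.  pvGo is the same recursion without suppression.
def pvGoS (sent : Option Int) (c : Char) (s e : Int) : List (Char × Int) → List (Char × Int × Int)
  | [] => if c = '\n' ∧ sent = some (e + 1) then [] else [(c, s, e)]
  | (c', n') :: l => if c = c' ∧ e + 1 = n' then pvGoS sent c s n' l else (c, s, e) :: pvGoS sent c' n' n' l

def pvGo (c : Char) (s e : Int) : List (Char × Int) → List (Char × Int × Int)
  | [] => [(c, s, e)]
  | (c', n') :: l => if c = c' ∧ e + 1 = n' then pvGo c s n' l else (c, s, e) :: pvGo c' n' n' l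

def pvRuns (sent : Option Int) : List (Char × Int) → List (Char × Int × Int)
  | [] => []
  | (c, n) :: l => pvGoS sent c n n l

def pvRunsB : List (Char × Int) → List (Char × Int × Int)
  | [] => []
  | (c, n) :: l => pvGo c n n l

-- the final (letter, number) pair of the run list seeded with (c, e)
def pvLastCE (c : Char) (e : Int) (l : List (Char × Int)) : Char × Int := (l.getLast?).getD (c, e)

-- the suppression condition of A's last iteration, phrased on the zipped input
def pvSupp (sent : Option Int) (l : List (Char × Int)) : Prop :=
  ∃ p, l.getLast? = some p ∧ p.1 = '\n' ∧ sent = some (p.2 + 1)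

-- the triple (letter, first resnum, last resnum) a (start,end) pair of B denotes
def pvTriple (cs : List Char) (ns : List Int) (se : Nat × Nat) : Char × Int × Int :=
  (cs.getD se.1 ' ', ns.getD se.1 0, ns.getD (se.2 - 1) 0)

theorem pvALoop_go (xs : List Char) : ∀ (rest : List Int) (front tailL : List (Option Int))
    (c : Char) (s i0 : Int) (parts : List (List Char)),
    xs.length = rest.length →
    pvALoop (xs ++ ['\n']) (front ++ rest.map some ++ tailL) front.length parts
        (some c) (some i0) (some s)
      = parts ++ (pvGoS (tailL.getD 0 none) c s (s + (front.length : Int) - i0 - 1) (xs.zip rest)).map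
          (fun r => pvFmt r.1 r.2.1 r.2.2) := by
  induction xs with
  | nil =>
    intro rest front tailL c s i0 parts hlen
    obtain rfl : rest = [] := by cases rest <;> simp_all
    simp only [List.map_nil, List.append_nil, List.nil_append, List.zip_nil_left]
    have hget : (front ++ tailL).getD front.length none = tailL.getD 0 none := by
      simp only [List.getD_eq_getElem?_getD]
      rw [List.getElem?_append_right (le_refl _)]
      simp
    by_cases hc : c = '\n' ∧ tailL.getD 0 none = some ((s + (front.length : Int) - i0 - 1) + 1)
    · -- last flush suppressed: res_nums[len] continues the '\n' run
      obtain ⟨rfl, hc2⟩ := hc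
      have hc2' : tailL.getD 0 none = some (s + (front.length : Int) - i0) := by
        rw [hc2]; congr 1; ring
      simp only [pvALoop, Option.getD_some]
      rw [if_neg (by rw [hget, hc2']; simp)]
      rw [show pvGoS (tailL.getD 0 none) '\n' s (s + (front.length : Int) - i0 - 1) [] = []
        from by
          simp only [pvGoS]
          rw [if_pos ⟨trivial, hc2⟩]]
      simp [pvALoop]
    · simp only [pvALoop, Option.getD_some]
      rw [if_pos (by
        rcases Decidable.not_and_iff_not_or_not.mp hc with h1 | h2
        · left
          intro hv
          exact h1 (Option.some.inj hv).symm
        · right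
          rw [hget]
          intro hv
          apply h2
          rw [← hv]
          congr 1
          ring)]
      rw [show pvGoS (tailL.getD 0 none) c s (s + (front.length : Int) - i0 - 1) []
          = [(c, s, s + (front.length : Int) - i0 - 1)] from by
        simp only [pvGoS]
        rw [if_neg hc]]
      simp [pvALoop]
  | cons x xs' ih =>
    intro rest front tailL c s i0 parts hlen
    obtain ⟨n', rt, rfl⟩ : ∃ n' rt, rest = n' :: rt := by
      cases rest with
      | nil => simp at hlen
      | cons a b => exact ⟨a, b, rfl⟩
    have hget : (front ++ (n' :: rt).map some ++ tailL).getD front.length none = some n' := by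
      simp [List.getD_eq_getElem?_getD]
    have hassoc : front ++ (n' :: rt).map some ++ tailL
        = (front ++ [some n']) ++ rt.map some ++ tailL := by simp
    have hlen' : (front ++ [some n']).length = front.length + 1 := by simp
    have hcast : ((front.length + 1 : Nat) : Int) = (front.length : Int) + 1 := by push_cast; ring
    by_cases h : x = c ∧ s + (front.length : Int) - i0 = n'
    · -- no boundary: run continues
      rw [List.cons_append]
      simp only [pvALoop, Option.getD_some]
      rw [if_neg (by simp [hget, h.1, h.2])]
      rw [hassoc]
      have hIH := ih rt (front ++ [some n']) tailL c s i0 parts (by simpa using hlen)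
      rw [hlen'] at hIH
      rw [hIH, hcast]
      have hgo : pvGoS (tailL.getD 0 none) c s (s + (front.length : Int) - i0 - 1)
            ((x :: xs').zip (n' :: rt))
          = pvGoS (tailL.getD 0 none) c s n' (xs'.zip rt) := by
        rw [List.zip_cons_cons, pvGoS, if_pos ⟨h.1.symm, by omega⟩]
      rw [hgo, show s + ((front.length : Int) + 1) - i0 - 1 = n' by omega]
    · -- boundary: flush current run, open a new one
      have hcond : (some x ≠ some c ∨
          some (s + (front.length : Int) - i0) ≠
            (front ++ (n' :: rt).map some ++ tailL).getD front.length none) := by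
        rw [hget]
        by_cases hx : x = c
        · right; simp only [ne_eq, Option.some.injEq]; intro hv; exact h ⟨hx, hv⟩
        · left; simpa using hx
      rw [List.cons_append]
      simp only [pvALoop, Option.getD_some]
      rw [if_pos hcond]
      simp only [hget]
      rw [hassoc]
      have hIH := ih rt (front ++ [some n']) tailL x n' (front.length : Int)
        (parts ++ [pvFmt c s (s + (front.length : Int) - i0 - 1)]) (by simpa using hlen)
      rw [hlen'] at hIH
      rw [hIH, hcast]
      have hgo : pvGoS (tailL.getD 0 none) c s (s + (front.length : Int) - i0 - 1)
            ((x :: xs').zip (n' :: rt))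
          = (c, s, s + (front.length : Int) - i0 - 1)
              :: pvGoS (tailL.getD 0 none) x n' n' (xs'.zip rt) := by
        rw [List.zip_cons_cons, pvGoS, if_neg]
        intro hcc
        exact h ⟨hcc.1.symm, by omega⟩
      rw [hgo, show n' + ((front.length : Int) + 1) - (front.length : Int) - 1 = n' by ring]
      simp

-- A's whole loop, for any res_nums list covering chain_ids (tailL = the part from index len on)
theorem pv_main (cs : List Char) (ns : List Int) (tailL : List (Option Int))
    (hlen : ns.length = cs.length) :
    pvALoop (cs ++ ['\n']) (ns.map some ++ tailL) 0 [] none none none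
      = (pvRuns (tailL.getD 0 none) (cs.zip ns)).map (fun r => pvFmt r.1 r.2.1 r.2.2) := by
  cases cs with
  | nil =>
    obtain rfl : ns = [] := by cases ns <;> simp_all
    simp [pvALoop, pvRuns]
  | cons x cs' =>
    obtain ⟨n0, ns', rfl⟩ : ∃ n0 ns', ns = n0 :: ns' := by
      cases ns with
      | nil => simp at hlen
      | cons a b => exact ⟨a, b, rfl⟩
    rw [List.cons_append]
    simp only [pvALoop]
    rw [if_pos (by simp)]
    have hm := pvALoop_go cs' ns' [some n0] tailL x n0 0 [] (by simp at hlen; omega)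
    have hb : ((n0 :: ns').map some ++ tailL).getD 0 none = some n0 := by simp
    simp only [List.length_singleton] at hm
    push_cast at hm
    rw [show n0 + 1 - 0 - 1 = n0 by ring] at hm
    simp only [List.map_cons]
    rw [show some n0 :: List.map some ns' ++ tailL = [some n0] ++ List.map some ns' ++ tailL by simp]
    norm_num at hm ⊢
    rw [hm]
    simp [pvRuns, List.zip_cons_cons]

theorem pvLastCE_cons (c : Char) (e : Int) (p : Char × Int) (l : List (Char × Int)) :
    pvLastCE c e (p :: l) = pvLastCE p.1 p.2 l := by
  cases l with
  | nil => simp [pvLastCE]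
  | cons q t => simp [pvLastCE, List.getLast?_cons]

theorem pvGoS_eq_pvGo (l : List (Char × Int)) : ∀ (sent : Option Int) (c : Char) (s e : Int),
    ¬ ((pvLastCE c e l).1 = '\n' ∧ sent = some ((pvLastCE c e l).2 + 1)) →
    pvGoS sent c s e l = pvGo c s e l := by
  induction l with
  | nil =>
    intro sent c s e h
    simp only [pvLastCE, List.getLast?_nil, Option.getD_none] at h
    simp [pvGoS, pvGo, h]
  | cons p t ih =>
    intro sent c s e h
    rw [pvLastCE_cons] at h
    obtain ⟨c', n'⟩ := p
    dsimp only at h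
    by_cases hb : c = c' ∧ e + 1 = n'
    · simp only [pvGoS, pvGo, if_pos hb]
      exact ih sent c s n' (by rw [hb.1]; exact h)
    · simp only [pvGoS, pvGo, if_neg hb]
      rw [ih sent c' n' n' h]

theorem pvGo_ne_nil (l : List (Char × Int)) : ∀ (c : Char) (s e : Int), pvGo c s e l ≠ [] := by
  induction l with
  | nil => intro c s e; simp [pvGo]
  | cons p t ih =>
    intro c s e
    obtain ⟨c', n'⟩ := p
    simp only [pvGo]
    split
    · exact ih c s n'
    · simp

-- relate pvSupp to pvLastCE on a non-empty zipped list
theorem pvSupp_iff_lastCE (c : Char) (n : Int) (l : List (Char × Int)) (sent : Option Int) :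
    pvSupp sent ((c, n) :: l) ↔
      ((pvLastCE c n l).1 = '\n' ∧ sent = some ((pvLastCE c n l).2 + 1)) := by
  unfold pvSupp pvLastCE
  rw [List.getLast?_cons]
  constructor
  · rintro ⟨p, hp, h1, h2⟩
    obtain rfl : p = (l.getLast?).getD (c, n) := (Option.some.inj hp).symm
    exact ⟨h1, h2⟩
  · rintro ⟨h1, h2⟩
    exact ⟨(l.getLast?).getD (c, n), rfl, h1, h2⟩

theorem pvRuns_eq (sent : Option Int) (l : List (Char × Int)) (h : ¬ pvSupp sent l) :
    pvRuns sent l = pvRunsB l := by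
  cases l with
  | nil => rfl
  | cons p t =>
    obtain ⟨c, n⟩ := p
    simp only [pvRuns, pvRunsB]
    exact pvGoS_eq_pvGo t sent c n n (fun hh => h ((pvSupp_iff_lastCE c n t sent).mpr hh))

-- the suppression condition, characterised on the raw inputs (the corner Pre_ excludes)
theorem pvSupp_char (cs : List Char) (l : List Int) (hpre : cs.length ≤ l.length) :
    pvSupp (((l.drop cs.length).map some ++ [none]).getD 0 none) (cs.zip (l.take cs.length))
      → (cs.length < l.length ∧ cs.getLast? = some '\n' ∧
         l.getD cs.length 0 = l.getD (cs.length - 1) 0 + 1) := by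
  by_cases hcs : cs = []
  · subst hcs
    rintro ⟨p, hp, -, -⟩
    simp at hp
  · have hn : 0 < cs.length := List.length_pos_iff.mpr hcs
    by_cases hlt : cs.length < l.length
    · have hdrop : l.drop cs.length = l[cs.length] :: l.drop (cs.length + 1) :=
        List.drop_eq_getElem_cons hlt
      have hsent : ((l.drop cs.length).map some ++ [none]).getD 0 none = some l[cs.length] := by
        rw [hdrop]; rfl
      have htk : (l.take cs.length).length = cs.length := by
        simp [List.length_take]; omega
      have hzlen : (cs.zip (l.take cs.length)).length = cs.length := by
        simp [List.length_zip, htk]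
      have hb2 : cs.length - 1 < (l.take cs.length).length := by omega
      have hb3 : cs.length - 1 < l.length := by omega
      have hzlast : (cs.zip (l.take cs.length)).getLast?
          = some (cs[cs.length - 1], (l.take cs.length)[cs.length - 1]) := by
        rw [List.getLast?_eq_getElem?, hzlen, List.getElem?_eq_getElem (by omega),
          List.getElem_zip]
      have htke : (l.take cs.length)[cs.length - 1] = l[cs.length - 1] :=
        List.getElem_take
      have hclast : cs.getLast? = some cs[cs.length - 1] := by
        rw [List.getLast?_eq_getElem?, List.getElem?_eq_getElem (by omega)]
      have hgd1 : l.getD cs.length 0 = l[cs.length] := List.getD_eq_getElem l 0 hlt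
      have hgd2 : l.getD (cs.length - 1) 0 = l[cs.length - 1] := List.getD_eq_getElem l 0 hb3
      rintro ⟨p, hp, h1, h2⟩
      rw [hzlast] at hp
      obtain rfl : p = _ := (Option.some.inj hp).symm
      dsimp only at h1 h2
      rw [hsent] at h2
      refine ⟨hlt, by rw [hclast, h1], ?_⟩
      rw [hgd1, hgd2, Option.some.inj h2, htke]
    · have hdrop : l.drop cs.length = [] := by
        rw [List.drop_eq_nil_iff]; omega
      rw [hdrop]
      simp only [List.map_nil, List.nil_append, List.getD]
      rintro ⟨p, -, -, h2⟩
      simp at h2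

-- A's port rewritten to its run list, for any in-Pre_ explicit res_nums
theorem pv_portA (chain_ids : String) (l : List Int)
    (hpre : chain_ids.toList.length ≤ l.length) :
    chain_ids_to_silent_format chain_ids (some l)
        = String.ofList (PySem.Chars.join [' ']
            ((pvRuns (((l.drop chain_ids.toList.length).map some ++ [none]).getD 0 none)
              (chain_ids.toList.zip (l.take chain_ids.toList.length))).map
                (fun r => pvFmt r.1 r.2.1 r.2.2))) := by
  unfold chain_ids_to_silent_format
  simp only
  rw [show l.map some ++ [none]
      = (l.take chain_ids.toList.length).map some
          ++ ((l.drop chain_ids.toList.length).map some ++ [none]) by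
    rw [← List.append_assoc, ← List.map_append, List.take_append_drop]]
  rw [pv_main _ _ _ (by rw [List.length_take]; omega)]

-- zip of a list against its own tail plus a final element splits off the last pair
theorem pvZipLast (a : List Nat) (x : Nat) :
    a.zip (a.drop 1 ++ [x]) = a.zip (a.drop 1)
      ++ (match a.getLast? with | some s => [(s, x)] | none => []) := by
  induction a with
  | nil => simp
  | cons s t ih =>
    cases t with
    | nil => simp
    | cons s1 t1 =>
      have hd : (s :: s1 :: t1).drop 1 = s1 :: t1 := rfl
      have hd2 : (s1 :: t1).drop 1 = t1 := rfl
      rw [hd, show (s1 :: t1) ++ [x] = s1 :: (t1 ++ [x]) from rfl, List.zip_cons_cons]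
      rw [hd2] at ih
      rw [ih, List.zip_cons_cons, List.getLast?_cons_cons]
      simp

-- appending one pair to the input either extends the last run or opens a new one
theorem pvGo_concat (l : List (Char × Int)) : ∀ (c : Char) (s e : Int) (c' : Char) (n' : Int),
    pvGo c s e (l ++ [(c', n')]) =
      (match (pvGo c s e l).getLast? with
       | some r => if r.1 = c' ∧ r.2.2 + 1 = n' then (pvGo c s e l).dropLast ++ [(r.1, r.2.1, n')]
                   else pvGo c s e l ++ [(c', n', n')]
       | none => [(c', n', n')]) := by
  induction l with
  | nil =>
    intro c s e c' n'
    show pvGo c s e [(c', n')] = _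
    by_cases h : c = c' ∧ e + 1 = n'
    · simp [pvGo, h]
    · simp [pvGo, h]
  | cons p t ih =>
    intro c s e c' n'
    obtain ⟨c0, n0⟩ := p
    rw [show ((c0, n0) :: t) ++ [(c', n')] = (c0, n0) :: (t ++ [(c', n')]) from rfl]
    by_cases h : c = c0 ∧ e + 1 = n0
    · rw [show pvGo c s e ((c0, n0) :: (t ++ [(c', n')])) = pvGo c s n0 (t ++ [(c', n')]) from by
        simp only [pvGo]; rw [if_pos h]]
      rw [show pvGo c s e ((c0, n0) :: t) = pvGo c s n0 t from by
        simp only [pvGo]; rw [if_pos h]]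
      exact ih c s n0 c' n'
    · have hne := pvGo_ne_nil t c0 n0 n0
      rw [show pvGo c s e ((c0, n0) :: (t ++ [(c', n')]))
          = (c, s, e) :: pvGo c0 n0 n0 (t ++ [(c', n')]) from by
        simp only [pvGo]; rw [if_neg h]]
      rw [show pvGo c s e ((c0, n0) :: t) = (c, s, e) :: pvGo c0 n0 n0 t from by
        simp only [pvGo]; rw [if_neg h]]
      rw [ih c0 n0 n0 c' n']
      obtain ⟨y, l2, hyl⟩ := List.exists_cons_of_ne_nil hne
      rw [hyl]
      rcases hg : (y :: l2).getLast? with _ | r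
      · simp [List.getLast?_eq_none_iff] at hg
      · simp only [List.getLast?_cons_cons, hg]
        split_ifs
        · rw [List.dropLast_cons_of_ne_nil (List.cons_ne_nil y l2)]
          simp
        · simp

theorem pvRunsB_concat (Q : List (Char × Int)) (c : Char) (n : Int) :
    pvRunsB (Q ++ [(c, n)]) =
      (match (pvRunsB Q).getLast? with
       | some r => if r.1 = c ∧ r.2.2 + 1 = n then (pvRunsB Q).dropLast ++ [(r.1, r.2.1, n)]
                   else pvRunsB Q ++ [(c, n, n)]
       | none => [(c, n, n)]) := by
  cases Q with
  | nil => simp [pvRunsB, pvGo]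
  | cons p t =>
    obtain ⟨c0, n0⟩ := p
    rw [show ((c0, n0) :: t) ++ [(c, n)] = (c0, n0) :: (t ++ [(c, n)]) from rfl]
    simp only [pvRunsB]
    exact pvGo_concat t c0 n0 n0 c n

-- the bridge: B's start/end pairs over the first k positions denote exactly the run list,
-- whose last run (if any) ends with the letter and number at position k-1
theorem pvBridge (cs : List Char) (ns : List Int) :
    ∀ (k : Nat), k ≤ cs.length → k ≤ ns.length →
    ((((List.range k).filter (pvBoundary cs ns)).zip
        (((List.range k).filter (pvBoundary cs ns)).drop 1 ++ [k])).map (pvTriple cs ns)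
      = pvRunsB ((cs.take k).zip (ns.take k)))
    ∧ (∀ r, (pvRunsB ((cs.take k).zip (ns.take k))).getLast? = some r →
        r.1 = cs.getD (k - 1) ' ' ∧ r.2.2 = ns.getD (k - 1) 0) := by
  intro k
  induction k with
  | zero =>
    intro _ _
    refine ⟨by simp [pvRunsB], ?_⟩
    intro r hr
    simp [pvRunsB] at hr
  | succ k ih =>
    intro hc hn
    have hkc : k < cs.length := hc
    have hkn : k < ns.length := hn
    obtain ⟨ihP, ihL⟩ := ih (le_of_lt hkc) (le_of_lt hkn)
    have htc : cs.take (k+1) = cs.take k ++ [cs.getD k ' '] := by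
      rw [List.take_succ, List.getElem?_eq_getElem hkc, List.getD_eq_getElem _ _ hkc]
      rfl
    have htn : ns.take (k+1) = ns.take k ++ [ns.getD k 0] := by
      rw [List.take_succ, List.getElem?_eq_getElem hkn, List.getD_eq_getElem _ _ hkn]
      rfl
    have hQ : (cs.take (k+1)).zip (ns.take (k+1))
        = (cs.take k).zip (ns.take k) ++ [(cs.getD k ' ', ns.getD k 0)] := by
      rw [htc, htn, List.zip_append (by simp [List.length_take]; omega)]
      rfl
    have hS1 : (List.range (k+1)).filter (pvBoundary cs ns)
        = (List.range k).filter (pvBoundary cs ns)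
          ++ (if pvBoundary cs ns k then [k] else []) := by
      rw [List.range_succ, List.filter_append]
      congr 1
      simp [List.filter_cons]
    by_cases hb : pvBoundary cs ns k = true
    · -- new run opened at k
      rw [hS1, if_pos hb]
      by_cases hS : (List.range k).filter (pvBoundary cs ns) = []
      · -- then k = 0 (index 0 is always a boundary)
        have hk0 : k = 0 := by
          by_contra hk
          have h0 : 0 ∈ (List.range k).filter (pvBoundary cs ns) :=
            List.mem_filter.mpr ⟨List.mem_range.mpr (Nat.pos_of_ne_zero hk), by simp [pvBoundary]⟩
          rw [hS] at h0
          simp at h0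
        subst hk0
        rw [hS]
        simp only [List.nil_append]
        have hz : ([0] : List Nat).zip (([0] : List Nat).drop 1 ++ [1]) = [(0, 1)] := rfl
        rw [hz]
        refine ⟨?_, ?_⟩
        · rw [hQ]
          simp [pvRunsB, pvTriple, pvGo]
        · intro r hr
          rw [hQ] at hr
          simp only [List.take_zero, List.zip_nil_left, List.nil_append] at hr
          simp only [pvRunsB, pvGo, List.getLast?_singleton, Option.some.injEq] at hr
          subst hr
          exact ⟨rfl, rfl⟩
      · -- k ≥ 1: the old pairs keep their ends, one pair (k, k+1) is appended
        have hSlen : 0 < ((List.range k).filter (pvBoundary cs ns)).length :=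
          List.length_pos_iff.mpr hS
        set S := (List.range k).filter (pvBoundary cs ns) with hSdef
        have hdrop : (S ++ [k]).drop 1 = S.drop 1 ++ [k] :=
          List.drop_append_of_le_length (by omega)
        have hzip : (S ++ [k]).zip ((S ++ [k]).drop 1 ++ [k+1])
            = S.zip (S.drop 1 ++ [k]) ++ [(k, k+1)] := by
          rw [hdrop]
          rw [List.zip_append (l₂ := S.drop 1 ++ [k]) (by simp [List.length_drop]; omega)]
          rfl
        have hRne : pvRunsB ((cs.take k).zip (ns.take k)) ≠ [] := by
          rw [← ihP]
          intro hcon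
          have hz := List.map_eq_nil_iff.mp hcon
          have hlz : (S.zip (S.drop 1 ++ [k])).length = 0 := by rw [hz]; rfl
          rw [List.length_zip] at hlz
          simp only [List.length_append, List.length_drop, List.length_cons,
            List.length_nil] at hlz
          omega
        obtain ⟨r0, hr0⟩ : ∃ r0, (pvRunsB ((cs.take k).zip (ns.take k))).getLast? = some r0 := by
          rcases hx : (pvRunsB ((cs.take k).zip (ns.take k))).getLast? with _ | r0
          · exact absurd (List.getLast?_eq_none_iff.mp hx) hRne
          · exact ⟨r0, rfl⟩
        have hnotext : ¬ (r0.1 = cs.getD k ' ' ∧ r0.2.2 + 1 = ns.getD k 0) := by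
          obtain ⟨hL1, hL2⟩ := ihL r0 hr0
          have hb' : ¬ k = 0 → (cs.getD k ' ' ≠ cs.getD (k-1) ' '
              ∨ ns.getD k 0 ≠ ns.getD (k-1) 0 + 1) := by
            intro hk
            by_contra hcon
            push_neg at hcon
            obtain ⟨e1, e2⟩ := hcon
            rw [List.getD_eq_getElem?_getD, List.getD_eq_getElem?_getD] at e1 e2
            simp [pvBoundary, hk, e1, e2] at hb
          have hk1 : ¬ k = 0 := by
            intro hk
            rw [hSdef, hk] at hSlen
            simp at hSlen
          rcases hb' hk1 with h | h
          · rintro ⟨e1, -⟩; rw [hL1] at e1; exact h e1.symm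
          · rintro ⟨-, e2⟩; rw [hL2] at e2; exact h (by omega)
        have hnew : pvRunsB ((cs.take (k+1)).zip (ns.take (k+1)))
            = pvRunsB ((cs.take k).zip (ns.take k))
              ++ [(cs.getD k ' ', ns.getD k 0, ns.getD k 0)] := by
          rw [hQ, pvRunsB_concat, hr0]
          simp only
          rw [if_neg hnotext]
        refine ⟨?_, ?_⟩
        · rw [hzip, List.map_append, ihP, hnew]
          congr 1
        · intro r hr
          rw [hnew, List.getLast?_concat] at hr
          obtain rfl : r = (cs.getD k ' ', ns.getD k 0, ns.getD k 0) := (Option.some.inj hr).symm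
          simp
    · -- no boundary at k: the last run is extended
      have hbf : pvBoundary cs ns k = false := by simp [hb]
      have hfacts : ¬ k = 0 ∧ cs.getD k ' ' = cs.getD (k-1) ' '
          ∧ ns.getD k 0 = ns.getD (k-1) 0 + 1 := by
        have hb2 := hbf
        simp [pvBoundary] at hb2
        refine ⟨hb2.1.1, ?_, ?_⟩
        · rw [List.getD_eq_getElem?_getD, List.getD_eq_getElem?_getD]
          exact hb2.1.2
        · rw [List.getD_eq_getElem?_getD, List.getD_eq_getElem?_getD]
          exact hb2.2
      obtain ⟨hk0, hceq, hneq⟩ := hfacts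
      rw [hS1, if_neg (by simp [hbf]), List.append_nil]
      set S := (List.range k).filter (pvBoundary cs ns) with hSdef
      have h0 : 0 ∈ S :=
        List.mem_filter.mpr ⟨List.mem_range.mpr (Nat.pos_of_ne_zero hk0), by simp [pvBoundary]⟩
      have hSne : S ≠ [] := by
        intro h
        rw [h] at h0
        simp at h0
      obtain ⟨sl, hsl⟩ : ∃ sl, S.getLast? = some sl := by
        rcases hx : S.getLast? with _ | sl
        · exact absurd (List.getLast?_eq_none_iff.mp hx) hSne
        · exact ⟨sl, rfl⟩
      have hpairs : ∀ x : Nat, S.zip (S.drop 1 ++ [x]) = S.zip (S.drop 1) ++ [(sl, x)] := by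
        intro x
        rw [pvZipLast, hsl]
      have hold : (S.zip (S.drop 1)).map (pvTriple cs ns) ++ [pvTriple cs ns (sl, k)]
          = pvRunsB ((cs.take k).zip (ns.take k)) := by
        rw [← ihP, hpairs k, List.map_append]
        rfl
      have hlast : (pvRunsB ((cs.take k).zip (ns.take k))).getLast?
          = some (pvTriple cs ns (sl, k)) := by
        rw [← hold, List.getLast?_concat]
      have hdl : (pvRunsB ((cs.take k).zip (ns.take k))).dropLast
          = (S.zip (S.drop 1)).map (pvTriple cs ns) := by
        rw [← hold, List.dropLast_concat]
      obtain ⟨hL1, hL2⟩ := ihL _ hlast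
      have hext : (pvTriple cs ns (sl, k)).1 = cs.getD k ' '
          ∧ (pvTriple cs ns (sl, k)).2.2 + 1 = ns.getD k 0 := by
        refine ⟨by rw [hL1, hceq], ?_⟩
        rw [hL2, hneq]
      have hnew : pvRunsB ((cs.take (k+1)).zip (ns.take (k+1)))
          = (S.zip (S.drop 1)).map (pvTriple cs ns)
            ++ [((pvTriple cs ns (sl, k)).1, (pvTriple cs ns (sl, k)).2.1, ns.getD k 0)] := by
        rw [hQ, pvRunsB_concat, hlast]
        simp only
        rw [if_pos hext, hdl]
      refine ⟨?_, ?_⟩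
      · rw [hpairs (k+1), List.map_append, hnew]
        congr 1
      · intro r hr
        rw [hnew, List.getLast?_concat] at hr
        obtain rfl : r = _ := (Option.some.inj hr).symm
        have hL1' : cs.getD sl ' ' = cs.getD (k - 1) ' ' := hL1
        refine ⟨?_, by simp⟩
        show cs.getD sl ' ' = cs.getD (k + 1 - 1) ' '
        simp only [Nat.add_sub_cancel]
        rw [hL1', hceq]

-- B's mapped start/end pairs are the formatted run list
theorem pv_portB (cs : List Char) (ns : List Int) (h : cs.length ≤ ns.length) :
    (((List.range cs.length).filter (pvBoundary cs ns)).zip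
        (((List.range cs.length).filter (pvBoundary cs ns)).drop 1 ++ [cs.length])).map
      (fun se => pvFmt (cs.getD se.1 ' ') (ns.getD se.1 0) (ns.getD (se.2 - 1) 0))
    = (pvRunsB (cs.zip (ns.take cs.length))).map (fun r => pvFmt r.1 r.2.1 r.2.2) := by
  have hbr := (pvBridge cs ns cs.length le_rfl h).1
  rw [List.take_length] at hbr
  rw [← hbr, List.map_map]
  rfl

-- ===== VERDICT (by name: the statement is the Claim_ definition above) =====
theorem chain_ids_to_silent_format_spec : Claim_equal_chain_ids_to_silent_format := by
  intro chain_ids res_nums _hdom hpre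
  unfold Spec_chain_ids_to_silent_format
  cases res_nums with
  | none =>
    unfold chain_ids_to_silent_format chain_ids_to_silent_format_alt
    simp only
    have hlen : (PySem.List.pyRange 1 ((chain_ids.toList.length : Int) + 1) 1).length
        = chain_ids.toList.length := by
      rw [PySem.List.length_pyRange_one]
      omega
    rw [pv_main _ _ [none] hlen]
    rw [show (([none] : List (Option Int)).getD 0 none) = (none : Option Int) from rfl]
    rw [pvRuns_eq none _ (by rintro ⟨p, -, -, h2⟩; simp at h2)]
    rw [pv_portB _ _ (by omega), List.take_of_length_le (by omega)]
  | some l =>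
    have hpre' : chain_ids.toList.length ≤ l.length ∧
        ¬ (chain_ids.toList.getLast? = some '\n' ∧ chain_ids.toList.length < l.length ∧
           l.getD chain_ids.toList.length 0 = l.getD (chain_ids.toList.length - 1) 0 + 1) := by
      unfold Pre_chain_ids_to_silent_format at hpre
      exact of_decide_eq_true hpre
    rw [pv_portA chain_ids l hpre'.1]
    rw [pvRuns_eq _ _ (fun hsupp => by
      obtain ⟨h1, h2, h3⟩ := pvSupp_char chain_ids.toList l hpre'.1 hsupp
      exact hpre'.2 ⟨h2, h1, h3⟩)]
    unfold chain_ids_to_silent_format_alt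
    simp only
    rw [pv_portB _ _ hpre'.1]
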